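-- pv_equiv track=rewrite | github.com/derailed-dash/Advent-of-Code | src/AoC_2020/d13_bus_schedule_primes_and_lcm/bus_schedule_part2.py | find_aligned_bus_from_pair
-- ===== SOURCE A (Python) =====
-- def find_aligned_bus_from_pair(bus1, bus2):
--     # We want to create a 'new bus' that represents two buses
--     # Determine the first and second times that these two buses align
--     # we save it as 'offset' and 'cycle_length'
--     # delta of new bus is 0! (you can imagine that uber-buses depart longer than 1min)
--
--     # bus -> (offset, bus ID (cycle_length), bus 'delta')
--     cycle, cycle_start = False, None
--     bus2_relative_delta = bus2[2] - bus1[2]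
--
--     # index stores incrementing multiple of bus cycle (e.g. 7)
--     bus1_multiple = bus1[0]
--     while not cycle:
--         # repeat until multiple of bus1 + offset is divisible by bus2 cycle
--         # with 7 and 13, this happens at 77 and 168
--         if (bus1_multiple + bus2_relative_delta) % bus2[1] == 0:
--             if cycle_start is None:
--                 # start the cycle
--                 cycle_start = bus1_multiple
--             else:
--                 # cycle found - we've got all we need
--                 return cycle_start, bus1_multiple - cycle_start, 0
--         bus1_multiple += bus1[1]
-- ===== SOURCE B (Python) =====
-- def _egcd(x, y):
--     # extended Euclid: returns (g, u, v) with g = gcd(x, y) >= 0 and u*x + v*y == g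
--     old_r, r = x, y
--     old_u, u = 1, 0
--     old_v, v = 0, 1
--     while r != 0:
--         q = old_r // r
--         old_r, r = r, old_r - q * r
--         old_u, u = u, old_u - q * u
--         old_v, v = v, old_v - q * v
--     if old_r < 0:
--         return -old_r, -old_u, -old_v
--     return old_r, old_u, old_v
--
--
-- def find_aligned_bus_from_pair(bus1, bus2):
--     # Solve the linear congruence bus1[0] + k*bus1[1] + delta ≡ 0 (mod bus2[1])
--     # directly with the extended Euclidean algorithm instead of stepping.
--     a, s = bus1[0], bus1[1]
--     n = bus2[1]
--     t = -(a + bus2[2] - bus1[2])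
--     g, u, _ = _egcd(s, n)
--     period = abs(n) // g          # alignments recur every `period` steps of bus1
--     k0 = ((t // g) * u) % period  # first step index at which the buses align
--     return a + k0 * s, s * period, 0
-- ===== Notes on version B (the rewrite author's own statement) =====
-- stated objective: faster
-- what changed: Replaces the unbounded step-by-step scan for the two alignment times with solving the linear congruence via the extended Euclidean algorithm and computing the period as lcm(s,n) analytically.
import Mathlib
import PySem

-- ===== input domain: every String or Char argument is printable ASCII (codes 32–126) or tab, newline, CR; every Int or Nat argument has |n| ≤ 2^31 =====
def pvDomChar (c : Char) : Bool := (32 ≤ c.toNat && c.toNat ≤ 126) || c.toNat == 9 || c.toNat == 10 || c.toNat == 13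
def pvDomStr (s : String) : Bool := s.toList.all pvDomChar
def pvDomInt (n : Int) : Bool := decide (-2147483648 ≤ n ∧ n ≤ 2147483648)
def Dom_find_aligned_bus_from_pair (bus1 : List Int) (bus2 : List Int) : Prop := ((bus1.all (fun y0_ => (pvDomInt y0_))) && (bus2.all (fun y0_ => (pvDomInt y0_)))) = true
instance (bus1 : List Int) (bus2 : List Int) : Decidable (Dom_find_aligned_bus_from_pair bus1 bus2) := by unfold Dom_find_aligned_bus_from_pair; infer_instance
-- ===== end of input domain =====

-- B replaces A's unbounded step-by-step scan by solving the linear congruence with the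
-- extended Euclidean algorithm and computing the alignment period analytically (faster).

-- ===== PORT A =====
-- A's while-loop, step for step; the Nat argument is fuel (a totality guard only:
-- under Pre_ the loop returns well within it, outside Pre_ Python's loop never returns).
def pvLoopA (s d n : Int) (start? : Option Int) (m : Int) : Nat → List Int
  | 0 => []
  | f + 1 =>
    if PySem.Int.mod (m + d) n = 0 then
      match start? with
      | none => pvLoopA s d n (some m) (m + s) f
      | some c => [c, m - c, 0]
    else pvLoopA s d n start? (m + s) f

def find_aligned_bus_from_pair (bus1 : List Int) (bus2 : List Int) : List Int :=
  match PySem.List.pyGet? bus2 2, PySem.List.pyGet? bus1 2, PySem.List.pyGet? bus1 0,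
        PySem.List.pyGet? bus1 1, PySem.List.pyGet? bus2 1 with
  | some b22, some b12, some a, some s, some n =>
      pvLoopA s (b22 - b12) n none a (2 * n.natAbs + 2)
  | _, _, _, _, _ => []      -- IndexError in Python: excluded by Pre_

-- ===== PORT B =====
-- extended Euclid from Source B (iterative; |r| strictly decreases)
def pvEgcd (oldr r oldu u oldv v : Int) : Int × Int × Int :=
  if _h : r = 0 then
    if oldr < 0 then (-oldr, -oldu, -oldv) else (oldr, oldu, oldv)
  else
    pvEgcd r (oldr - PySem.Int.floordiv oldr r * r)
           u (oldu - PySem.Int.floordiv oldr r * u)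
           v (oldv - PySem.Int.floordiv oldr r * v)
termination_by r.natAbs
decreasing_by
  have hmod := PySem.Int.floordiv_mul_add_mod oldr r
  rcases lt_trichotomy r 0 with hr | hr | hr
  · have hb := PySem.Int.mod_neg_bounds oldr (b := r) hr
    omega
  · exact absurd hr _h
  · have h1 := PySem.Int.mod_nonneg oldr (b := r) hr
    have h2 := PySem.Int.mod_lt oldr (b := r) hr
    omega

def find_aligned_bus_from_pair_alt (bus1 : List Int) (bus2 : List Int) : List Int :=
  match PySem.List.pyGet? bus1 0 with
  | none => []      -- IndexError in Python: excluded by Pre_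
  | some a =>
    match PySem.List.pyGet? bus1 1 with
    | none => []
    | some s =>
      match PySem.List.pyGet? bus2 1 with
      | none => []
      | some n =>
        match PySem.List.pyGet? bus2 2 with
        | none => []
        | some b22 =>
          match PySem.List.pyGet? bus1 2 with
          | none => []
          | some b12 =>
            let t := -(a + b22 - b12)
            let guv := pvEgcd s n 1 0 0 1
            let period := PySem.Int.floordiv |n| guv.1
            let k0 := PySem.Int.mod (PySem.Int.floordiv t guv.1 * guv.2.1) period
            [a + k0 * s, s * period, 0]

-- ===== PRECONDITION & SPEC =====
-- Pre_ is exactly where Python's A returns: both lists long enough (else IndexError),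
-- bus2[1] ≠ 0 (else ZeroDivisionError), and the alignment congruence solvable,
-- i.e. gcd(bus1[1], bus2[1]) divides bus1[0] + bus2[2] - bus1[2] (else A loops forever).
def Pre_find_aligned_bus_from_pair (bus1 : List Int) (bus2 : List Int) : Prop :=
  3 ≤ bus1.length ∧ 3 ≤ bus2.length ∧ bus2.getD 1 0 ≠ 0 ∧
  (Int.gcd (bus1.getD 1 0) (bus2.getD 1 0) : Int) ∣ (bus1.getD 0 0 + (bus2.getD 2 0 - bus1.getD 2 0))
instance (bus1 : List Int) (bus2 : List Int) : Decidable (Pre_find_aligned_bus_from_pair bus1 bus2) := by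
  unfold Pre_find_aligned_bus_from_pair; infer_instance

def pvWitness_find_aligned_bus_from_pair : List Int × List Int := ([7, 7, 0], [0, 13, 0])

def Spec_find_aligned_bus_from_pair (bus1 : List Int) (bus2 : List Int) (out : List Int) : Prop := out = find_aligned_bus_from_pair_alt bus1 bus2
instance (bus1 : List Int) (bus2 : List Int) (out : List Int) : Decidable (Spec_find_aligned_bus_from_pair bus1 bus2 out) := by unfold Spec_find_aligned_bus_from_pair; infer_instance

-- ===== CLAIM (what is proved, stated in full; the proofs are below) =====
def Claim_equal_find_aligned_bus_from_pair : Prop := ∀ (bus1 : List Int) (bus2 : List Int), Dom_find_aligned_bus_from_pair bus1 bus2 → Pre_find_aligned_bus_from_pair bus1 bus2 → Spec_find_aligned_bus_from_pair bus1 bus2 (find_aligned_bus_from_pair bus1 bus2)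

-- ===== LEMMAS AND PROOFS =====

-- one unfolding step of A's loop
theorem pvLoopA_succ (s d n : Int) (st : Option Int) (m : Int) (f : Nat) :
    pvLoopA s d n st m (f + 1)
      = if PySem.Int.mod (m + d) n = 0 then
          (match st with
           | none => pvLoopA s d n (some m) (m + s) f
           | some c => [c, m - c, 0])
        else pvLoopA s d n st (m + s) f := rfl

theorem pvEgcd_spec (x y : Int) : ∀ (oldr r oldu u oldv v : Int),
    oldu * x + oldv * y = oldr → u * x + v * y = r →
    (pvEgcd oldr r oldu u oldv v).2.1 * x + (pvEgcd oldr r oldu u oldv v).2.2 * y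
        = (pvEgcd oldr r oldu u oldv v).1
    ∧ (pvEgcd oldr r oldu u oldv v).1 = (Int.gcd oldr r : Int) := by
  intro oldr r oldu u oldv v
  induction oldr, r, oldu, u, oldv, v using pvEgcd.induct with
  | case1 oldr oldu u oldv v hneg =>
    intro h1 h2
    rw [pvEgcd]
    simp only [dif_pos, if_pos hneg]
    constructor
    · linarith
    · rw [Int.gcd_zero_right]
      omega
  | case2 oldr oldu u oldv v hneg =>
    intro h1 h2
    rw [pvEgcd]
    simp only [dif_pos, if_neg hneg]
    constructor
    · exact h1
    · rw [Int.gcd_zero_right]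
      omega
  | case3 oldr r oldu u oldv v h ih =>
    intro h1 h2
    have h2' : (oldu - PySem.Int.floordiv oldr r * u) * x + (oldv - PySem.Int.floordiv oldr r * v) * y
        = oldr - PySem.Int.floordiv oldr r * r := by
      linear_combination h1 - PySem.Int.floordiv oldr r * h2
    have hres := ih h2 h2'
    rw [pvEgcd]
    simp only [dif_neg h]
    refine ⟨hres.1, ?_⟩
    rw [hres.2]
    have he : oldr - PySem.Int.floordiv oldr r * r = oldr + (-(PySem.Int.floordiv oldr r)) * r := by
      ring
    rw [he, Int.gcd_add_mul_right_right, Int.gcd_comm]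

-- skipping `c` consecutive non-hit steps of A's loop
theorem pvLoopA_skip (s d n a : Int) (st : Option Int) :
    ∀ (c k f : Nat),
      (∀ j : Nat, j < c → ¬ (PySem.Int.mod (a + ((k + j : Nat) : Int) * s + d) n = 0)) → c ≤ f →
      pvLoopA s d n st (a + (k : Int) * s) f
        = pvLoopA s d n st (a + ((k + c : Nat) : Int) * s) (f - c) := by
  intro c
  induction c with
  | zero => intro k f _ _; simp
  | succ c ih =>
    intro k f hno hf
    obtain ⟨f', rfl⟩ : ∃ f', f = f' + 1 := ⟨f - 1, by omega⟩
    rw [pvLoopA_succ]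
    have h0 := hno 0 (by omega)
    simp only [Nat.add_zero] at h0
    rw [if_neg h0]
    have hm : a + (k : Int) * s + s = a + ((k + 1 : Nat) : Int) * s := by push_cast; ring
    rw [hm, show k + (c + 1) = (k + 1) + c by omega, show f' + 1 - (c + 1) = f' - c by omega]
    exact ih (k + 1) f' (fun j hj => by
        have hj' := hno (j + 1) (by omega)
        have he : ((k + 1 + j : Nat) : Int) = ((k + (j + 1) : Nat) : Int) := by push_cast; ring
        rw [he]; exact hj') (by omega)

-- the core: if hits are exactly the steps k ≡ k0 (mod P), A's loop returns [a+k0*s, P*s, 0]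
theorem pvLoopA_eq (a s d n k0 P : Int)
    (hP : 0 < P) (hk0 : 0 ≤ k0) (hk0P : k0 < P) (hPn : P ≤ (n.natAbs : Int))
    (hiff : ∀ k : Int, PySem.Int.mod (a + k * s + d) n = 0 ↔ P ∣ (k - k0)) :
    pvLoopA s d n none a (2 * n.natAbs + 2) = [a + k0 * s, P * s, 0] := by
  have nodvd : ∀ x : Int, x ≠ 0 → -P < x → x < P → ¬ P ∣ x := by
    intro x hx h1 h2 hdvd
    have h3 : P ≤ |x| := Int.le_of_dvd (abs_pos.mpr hx) ((dvd_abs P x).mpr hdvd)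
    have h4 : |x| < P := abs_lt.mpr ⟨h1, h2⟩
    omega
  set p : Nat := P.toNat with hp
  set κ : Nat := k0.toNat with hκ
  have hpP : (p : Int) = P := by omega
  have hκk0 : (κ : Int) = k0 := by omega
  have hκp : κ < p := by omega
  have hpn : p ≤ n.natAbs := by omega
  have hno1 : ∀ j : Nat, j < κ → ¬ (PySem.Int.mod (a + ((0 + j : Nat) : Int) * s + d) n = 0) := by
    intro j hj
    rw [hiff]
    apply nodvd
    · push_cast; omega
    · push_cast; omega
    · push_cast; omega
  have hstart : a = a + ((0 : Nat) : Int) * s := by simp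
  conv_lhs => rw [hstart]
  rw [pvLoopA_skip s d n a none κ 0 (2 * n.natAbs + 2) hno1 (by omega)]
  -- one step: the first hit at κ
  obtain ⟨f1, hf1⟩ : ∃ f1, 2 * n.natAbs + 2 - κ = f1 + 1 := ⟨2 * n.natAbs + 1 - κ, by omega⟩
  rw [hf1, pvLoopA_succ]
  rw [if_pos (by rw [hiff]; exact ⟨0, by push_cast; omega⟩)]
  -- skip the p-1 non-hits strictly between the two alignments
  have hno2 : ∀ j : Nat, j < p - 1 → ¬ (PySem.Int.mod (a + ((κ + 1 + j : Nat) : Int) * s + d) n = 0) := by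
    intro j hj
    rw [hiff]
    apply nodvd
    · push_cast; omega
    · push_cast; omega
    · push_cast; omega
  have hm : a + ((0 + κ : Nat) : Int) * s + s = a + ((κ + 1 : Nat) : Int) * s := by push_cast; ring
  rw [hm, pvLoopA_skip s d n a _ (p - 1) (κ + 1) f1 hno2 (by omega)]
  -- final step: the second hit at κ + p
  obtain ⟨f2, hf2⟩ : ∃ f2, f1 - (p - 1) = f2 + 1 := ⟨f1 - (p - 1) - 1, by omega⟩
  rw [hf2, pvLoopA_succ]
  rw [if_pos (by rw [hiff]; exact ⟨1, by push_cast; omega⟩)]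
  have e1 : ((0 + κ : Nat) : Int) = k0 := by push_cast; omega
  have e2 : ((κ + 1 + (p - 1) : Nat) : Int) = k0 + P := by push_cast; omega
  rw [e1, e2]
  show [a + k0 * s, a + (k0 + P) * s - (a + k0 * s), 0] = [a + k0 * s, P * s, 0]
  rw [show a + (k0 + P) * s - (a + k0 * s) = P * s by ring]


theorem pvGet0 (a : Int) (l : List Int) : PySem.List.pyGet? (a :: l) 0 = some a := by
  simp [PySem.List.pyGet?, PySem.List.pyIdx?]

theorem pvGet1 (a b : Int) (l : List Int) : PySem.List.pyGet? (a :: b :: l) 1 = some b := by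
  simp [PySem.List.pyGet?, PySem.List.pyIdx?]

theorem pvGet2 (a b c : Int) (l : List Int) : PySem.List.pyGet? (a :: b :: c :: l) 2 = some c := by
  simp [PySem.List.pyGet?, PySem.List.pyIdx?]
  rw [if_pos (by omega)]
  simp

-- ===== VERDICT (by name: the statement is the Claim_ definition above) =====
theorem find_aligned_bus_from_pair_spec : Claim_equal_find_aligned_bus_from_pair := by
  intro bus1 bus2 _hdom hpre
  obtain ⟨hl1, hl2, hn, hdvd⟩ := hpre
  rcases bus1 with _ | ⟨a, bus1⟩; · simp at hl1
  rcases bus1 with _ | ⟨s, bus1⟩; · simp at hl1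
  rcases bus1 with _ | ⟨d1, r1⟩; · simp at hl1
  rcases bus2 with _ | ⟨b20, bus2⟩; · simp at hl2
  rcases bus2 with _ | ⟨n, bus2⟩; · simp at hl2
  rcases bus2 with _ | ⟨b22, r2⟩; · simp at hl2
  simp only [List.getD_cons_zero, List.getD_cons_succ] at hn hdvd
  -- the arithmetic facts
  set g : Int := (Int.gcd s n : Int) with hg
  have hgcdne : Int.gcd s n ≠ 0 := fun h => hn (Int.gcd_eq_zero_iff.mp h).2
  have hgpos : 0 < g := by rw [hg]; exact_mod_cast Nat.pos_of_ne_zero hgcdne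
  have hegcd := pvEgcd_spec s n s n 1 0 0 1 (by ring) (by ring)
  set U : Int := (pvEgcd s n 1 0 0 1).2.1 with hU
  set V : Int := (pvEgcd s n 1 0 0 1).2.2 with hV
  have hG : (pvEgcd s n 1 0 0 1).1 = g := hegcd.2
  have hbez : U * s + V * n = g := by rw [← hG]; exact hegcd.1
  have hgdvd_s : g ∣ s := Int.gcd_dvd_left s n
  have hgdvd_n : g ∣ n := Int.gcd_dvd_right s n
  have hgdvd_abs : g ∣ |n| := (dvd_abs _ _).mpr hgdvd_n
  have hfl : PySem.Int.floordiv |n| g = |n| / g := PySem.Int.floordiv_eq_ediv_of_pos hgpos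
  set P : Int := |n| / g with hPdef
  have hPg : P * g = |n| := Int.ediv_mul_cancel hgdvd_abs
  have hnabs : 0 < |n| := abs_pos.mpr hn
  have hPpos : 0 < P := by nlinarith
  have hPle : P ≤ (n.natAbs : Int) := by
    have h1 : (n.natAbs : Int) = |n| := (Int.abs_eq_natAbs n).symm
    nlinarith
  have hgt : g ∣ -(a + b22 - d1) := by
    rw [show -(a + b22 - d1) = -(a + (b22 - d1)) by ring]
    exact (dvd_neg).mpr hdvd
  set t : Int := -(a + b22 - d1) with ht
  have hflt : PySem.Int.floordiv t g = t / g := PySem.Int.floordiv_eq_ediv_of_pos hgpos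
  set k0 : Int := PySem.Int.mod (t / g * U) P with hk0def
  have hk0nonneg : 0 ≤ k0 := PySem.Int.mod_nonneg _ hPpos
  have hk0lt : k0 < P := PySem.Int.mod_lt _ hPpos
  have hq := PySem.Int.floordiv_mul_add_mod (t / g * U) P
  set q : Int := PySem.Int.floordiv (t / g * U) P with hqdef
  have htg : t / g * g = t := Int.ediv_mul_cancel hgt
  obtain ⟨s1, hs1⟩ := hgdvd_s
  obtain ⟨n1, hn1⟩ := hgdvd_n
  have hsP : n ∣ P * s := by
    have he : P * s = |n| * s1 := by rw [hs1, ← hPg]; ring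
    rw [he]
    exact dvd_mul_of_dvd_left ((dvd_abs n n).mpr dvd_rfl) s1
  have hhit : n ∣ k0 * s - t := by
    have hk0eq : k0 = t / g * U - q * P := by linarith
    have h1 : k0 * s - t = -(t / g) * V * n - q * (P * s) := by
      rw [hk0eq]
      linear_combination (t / g) * hbez + htg
    rw [h1]
    exact dvd_sub (dvd_mul_left n (-(t / g) * V)) (Dvd.dvd.mul_left hsP q)
  have hs1div : s / g = s1 := by rw [hs1]; exact Int.mul_ediv_cancel_left s1 (ne_of_gt hgpos)
  have hn1div : n / g = n1 := by rw [hn1]; exact Int.mul_ediv_cancel_left n1 (ne_of_gt hgpos)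
  have hcop : IsCoprime s1 n1 := by
    apply Int.isCoprime_iff_gcd_eq_one.mpr
    have h1 := Int.gcd_div_gcd_div_gcd (i := s) (j := n) (Nat.pos_of_ne_zero hgcdne)
    rwa [← hg, hs1div, hn1div] at h1
  have hPn1 : P = |n1| := by
    have h1 : |n| = g * |n1| := by rw [hn1, abs_mul, abs_of_pos hgpos]
    rw [hPdef, h1, Int.mul_ediv_cancel_left _ (ne_of_gt hgpos)]
  have hiff : ∀ k : Int, PySem.Int.mod (a + k * s + (b22 - d1)) n = 0 ↔ P ∣ (k - k0) := by
    intro k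
    rw [PySem.Int.mod_eq_zero_iff_dvd,
        show a + k * s + (b22 - d1) = (k0 * s - t) + (k - k0) * s by rw [ht]; ring,
        dvd_add_right hhit,
        show (k - k0) * s = g * ((k - k0) * s1) by rw [hs1]; ring]
    conv_lhs => rw [hn1]
    rw [mul_dvd_mul_iff_left (ne_of_gt hgpos), hPn1]
    constructor
    · intro hh
      exact (abs_dvd _ _).mpr (hcop.symm.dvd_of_dvd_mul_right hh)
    · intro hh
      exact Dvd.dvd.mul_right ((abs_dvd _ _).mp hh) s1
  -- reduce both ports and conclude
  unfold Spec_find_aligned_bus_from_pair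
  unfold find_aligned_bus_from_pair find_aligned_bus_from_pair_alt
  simp only [pvGet0, pvGet1, pvGet2]
  rw [pvLoopA_eq a s (b22 - d1) n k0 P hPpos hk0nonneg hk0lt hPle hiff]
  rw [hG, hfl, hflt]
  rw [mul_comm P s]
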